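-- pv_equiv track=rewrite | github.com/queelius/repoindex | repoindex/output.py | _auto_columns
-- ===== SOURCE A (Python) =====
-- from typing import Iterable, Any, Dict, Optional, List
--
-- def _auto_columns(rows: List[Dict]) -> List[str]:
--     """Auto-detect columns from rows."""
--     if not rows:
--         return []
--
--     # Common column order preference
--     preferred = ['name', 'path', 'status', 'branch', 'language', 'type', 'timestamp', 'repo']
--
--     # Get all keys from first row
--     all_keys = set(rows[0].keys())
--
--     # Start with preferred columns that exist
--     columns = [col for col in preferred if col in all_keys]
--
--     # Add remaining columns
--     for key in sorted(all_keys):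
--         if key not in columns:
--             columns.append(key)
--
--     # Limit to reasonable number
--     return columns[:8]
-- ===== SOURCE B (Python) =====
-- from typing import List, Dict
--
-- def _auto_columns(rows: List[Dict]) -> List[str]:
--     """Auto-detect columns from rows."""
--     if not rows:
--         return []
--     preferred = ['name', 'path', 'status', 'branch', 'language', 'type', 'timestamp', 'repo']
--     all_keys = set(rows[0].keys())
--
--     def rank(k):
--         return preferred.index(k) if k in preferred else len(preferred)
--
--     return sorted(all_keys, key=lambda k: (rank(k), k))[:8]
-- ===== Notes on version B (the rewrite author's own statement) =====
-- stated objective: simpler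
-- what changed: Replaces the two-phase build (filter preferred keys, then append the remaining keys of sorted(all_keys) with an inner membership scan) by a single sorted() call over the key set with a composite sort key (rank in the preferred list, then the key itself), sliced to 8.
import Mathlib
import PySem

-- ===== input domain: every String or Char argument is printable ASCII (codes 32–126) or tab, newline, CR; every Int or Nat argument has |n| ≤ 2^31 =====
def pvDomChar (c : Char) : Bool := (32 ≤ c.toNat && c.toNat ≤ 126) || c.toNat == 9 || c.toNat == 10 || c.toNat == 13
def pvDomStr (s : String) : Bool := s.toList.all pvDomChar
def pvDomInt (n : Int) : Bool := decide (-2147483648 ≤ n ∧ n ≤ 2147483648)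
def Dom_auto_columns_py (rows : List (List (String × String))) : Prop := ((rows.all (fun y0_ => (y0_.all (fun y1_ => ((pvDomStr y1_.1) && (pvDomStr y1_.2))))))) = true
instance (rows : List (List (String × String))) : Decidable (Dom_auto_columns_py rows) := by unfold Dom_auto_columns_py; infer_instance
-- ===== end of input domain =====

-- B replaces A's two-phase column build (filter the preferred keys, then append the
-- remaining sorted keys with an inner membership scan) by ONE sorted() call with a
-- composite key (rank in the preferred list, then the key itself); objective: simpler.

-- ===== PORT A =====
def auto_columns_py (rows : List (List (String × String))) : List String :=
  match rows with
  | [] => []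
  | r0 :: _ =>
    let preferred : List String := ["name", "path", "status", "branch", "language", "type", "timestamp", "repo"]
    let all_keys : PySem.Set String := PySem.Set.ofList (r0.map Prod.fst)
    let columns := preferred.filter (fun col => PySem.Set.contains all_keys col)
    let columns := (PySem.List.sorted all_keys (fun k => k) false).foldl
        (fun cols key => if key ∈ cols then cols else cols ++ [key]) columns
    PySem.List.slice columns none (some 8)

-- ===== PORT B =====
-- preferred.index(k) if k in preferred else len(preferred)
def pvRank (preferred : List String) (k : String) : Int :=
  match PySem.List.index? preferred k with
  | some i => (i : Int)
  | none => (preferred.length : Int)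

def auto_columns_py_alt (rows : List (List (String × String))) : List String :=
  match rows with
  | [] => []
  | r0 :: _ =>
    let preferred : List String := ["name", "path", "status", "branch", "language", "type", "timestamp", "repo"]
    let all_keys : PySem.Set String := PySem.Set.ofList (r0.map Prod.fst)
    PySem.List.slice
      (PySem.List.sorted2 all_keys (fun k => pvRank preferred k) (fun k => k) false)
      none (some 8)

-- ===== PRECONDITION & SPEC =====
def Spec_auto_columns_py (rows : List (List (String × String))) (out : List String) : Prop := out = auto_columns_py_alt rows
instance (rows : List (List (String × String))) (out : List String) : Decidable (Spec_auto_columns_py rows out) := by unfold Spec_auto_columns_py; infer_instance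

-- ===== CLAIM (what is proved, stated in full; the proofs are below) =====
def Claim_equal_auto_columns_py : Prop := ∀ (rows : List (List (String × String))), Dom_auto_columns_py rows → Spec_auto_columns_py rows (auto_columns_py rows)

-- ===== LEMMAS AND PROOFS =====

def pvPreferred : List String := ["name", "path", "status", "branch", "language", "type", "timestamp", "repo"]

-- sorted2 with keys (k1, k2) is sorted with the lexicographic key
theorem pv_sorted2_eq_sorted_toLex {α κ₁ κ₂ : Type} [LinearOrder κ₁] [LinearOrder κ₂]
    (xs : List α) (k1 : α → κ₁) (k2 : α → κ₂) :
    PySem.List.sorted2 xs k1 k2 false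
      = PySem.List.sorted xs (fun x => toLex (k1 x, k2 x)) false := by
  unfold PySem.List.sorted2 PySem.List.sorted
  have h : (fun a b => decide (k1 a < k1 b) || (!decide (k1 b < k1 a) && decide (k2 a < k2 b)))
      = (fun a b : α => decide ((toLex (k1 a, k2 a) : κ₁ ×ₗ κ₂) < toLex (k1 b, k2 b))) := by
    funext a b
    rcases lt_trichotomy (k1 a) (k1 b) with h1 | h1 | h1
    · simp [Prod.Lex.toLex_lt_toLex, h1, lt_asymm h1]
    · simp [Prod.Lex.toLex_lt_toLex, h1]
    · simp [Prod.Lex.toLex_lt_toLex, h1, lt_asymm h1, h1.ne']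
  simp only [if_neg Bool.false_ne_true, h]

-- A's appending loop, on a duplicate-free list
theorem pv_foldl_append_not_mem (l : List String) (c : List String) (h : l.Nodup) :
    l.foldl (fun cols k => if k ∈ cols then cols else cols ++ [k]) c
      = c ++ l.filter (fun k => decide (k ∉ c)) := by
  induction l generalizing c with
  | nil => simp
  | cons x t ih =>
    rcases List.nodup_cons.mp h with ⟨hx, ht⟩
    by_cases hc : x ∈ c
    · simp [hc, ih c ht]
    · have hxt : ∀ k ∈ t, (decide (k ∉ c ++ [x])) = (decide (k ∉ c)) := by
        intro k hk
        have hne : k ≠ x := fun he => hx (he ▸ hk)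
        simp [hne]
      rw [List.foldl_cons, if_neg hc, ih (c ++ [x]) ht, List.filter_congr hxt,
          List.filter_cons_of_pos (by simpa using hc)]
      simp

theorem pv_rank_of_not_mem {k : String} (h : k ∉ pvPreferred) : pvRank pvPreferred k = 8 := by
  unfold pvRank
  rw [(PySem.List.index?_eq_none_iff (xs := pvPreferred) (v := k)).mpr h]
  decide

theorem pv_rank_lt_of_mem {k : String} (h : k ∈ pvPreferred) : pvRank pvPreferred k < 8 := by
  rcases Option.isSome_iff_exists.mp ((PySem.List.index?_isSome_iff (xs := pvPreferred) (v := k)).mpr h) with ⟨i, hi⟩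
  rcases PySem.List.getElem_of_index?_eq_some hi with ⟨hk, -⟩
  simp only [pvRank, hi]
  exact_mod_cast hk

-- the two column lists agree before truncation
theorem pv_cols_eq (r0 : List (String × String)) :
    (PySem.List.sorted2 (PySem.Set.ofList (r0.map Prod.fst))
        (fun k => pvRank pvPreferred k) (fun k => k) false)
    = (PySem.List.sorted (PySem.Set.ofList (r0.map Prod.fst)) (fun k => k) false).foldl
        (fun cols key => if key ∈ cols then cols else cols ++ [key])
        (pvPreferred.filter (fun col => PySem.Set.contains (PySem.Set.ofList (r0.map Prod.fst)) col)) := by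
  set keys : List String := PySem.Set.ofList (r0.map Prod.fst) with hkeys
  have hknd : keys.Nodup := PySem.Set.nodup_ofList _
  set S : List String := PySem.List.sorted keys (fun k => k) false with hS
  have hSperm : S.Perm keys := PySem.List.sorted_perm _ _ _
  have hSnd : S.Nodup := (hSperm.nodup_iff).mpr hknd
  have hSlt : S.Pairwise (· < ·) := PySem.List.sorted_ofList_pairwise_lt _
  have hSmem : ∀ {x : String}, x ∈ S → x ∈ keys := fun hx => hSperm.mem_iff.mp hx
  set P : List String := pvPreferred.filter (fun col => PySem.Set.contains keys col) with hP
  have hPmem : ∀ {x : String}, x ∈ P ↔ x ∈ pvPreferred ∧ x ∈ keys := by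
    intro x
    simp [hP, List.mem_filter]
  -- rewrite the loop as an append of a filter
  rw [pv_foldl_append_not_mem S P hSnd]
  -- the remaining-keys filter is "not preferred"
  have hfc : S.filter (fun k => decide (k ∉ P)) = S.filter (fun k => !decide (k ∈ pvPreferred)) := by
    apply List.filter_congr
    intro k hk
    have hkk : k ∈ keys := hSmem hk
    by_cases hp : k ∈ pvPreferred
    · simp [hp, hPmem.mpr ⟨hp, hkk⟩]
    · have hnp : k ∉ P := fun hin => hp (hPmem.mp hin).1
      simp [hp, hnp]
  rw [hfc, pv_sorted2_eq_sorted_toLex]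
  apply PySem.List.sorted_eq_of_perm_of_pairwise_lt
  · -- permutation
    have h1 : P.Perm (keys.filter (fun x => decide (x ∈ pvPreferred))) := by
      rw [List.perm_ext_iff_of_nodup (List.Nodup.filter _ (by decide)) (hknd.filter _)]
      intro x
      simp [List.mem_filter, and_comm]
    have h2 : (S.filter (fun k => !decide (k ∈ pvPreferred))).Perm
        (keys.filter (fun k => !decide (k ∈ pvPreferred))) := hSperm.filter _
    exact (h1.append h2).trans (List.filter_append_perm _ keys)
  · -- strictly increasing under the lexicographic key
    rw [List.pairwise_append]
    refine ⟨?_, ?_, ?_⟩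
    · have hpp : pvPreferred.Pairwise
          (fun a b => pvRank pvPreferred a < pvRank pvPreferred b) := by decide
      refine (hpp.filter _).imp ?_
      intro a b hab
      exact Prod.Lex.toLex_lt_toLex.mpr (Or.inl hab)
    · refine List.Pairwise.imp_of_mem ?_ (hSlt.filter _)
      intro a b ha hb hab
      have hna : a ∉ pvPreferred := by
        rcases List.mem_filter.mp ha with ⟨-, h⟩; simpa using h
      have hnb : b ∉ pvPreferred := by
        rcases List.mem_filter.mp hb with ⟨-, h⟩; simpa using h
      exact Prod.Lex.toLex_lt_toLex.mpr
        (Or.inr ⟨by rw [pv_rank_of_not_mem hna, pv_rank_of_not_mem hnb], hab⟩)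
    · intro a ha b hb
      have hpa : a ∈ pvPreferred := (hPmem.mp ha).1
      have hnb : b ∉ pvPreferred := by
        rcases List.mem_filter.mp hb with ⟨-, h⟩; simpa using h
      exact Prod.Lex.toLex_lt_toLex.mpr
        (Or.inl (by rw [pv_rank_of_not_mem hnb]; exact pv_rank_lt_of_mem hpa))

-- ===== VERDICT (by name: the statement is the Claim_ definition above) =====
theorem auto_columns_py_spec : Claim_equal_auto_columns_py := by
  intro rows _
  unfold Spec_auto_columns_py auto_columns_py auto_columns_py_alt
  match rows with
  | [] => rfl
  | r0 :: rest =>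
    simp only []
    rw [show (["name", "path", "status", "branch", "language", "type", "timestamp", "repo"] : List String) = pvPreferred from rfl,
        pv_cols_eq r0]
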